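-- pv_equiv track=rewrite | github.com/yurayli/jigsaw-toxic-comments | jigsaw_toxic_keras/utils.py | remove_long_tail
-- ===== SOURCE A (Python) =====
-- def remove_long_tail(word):
--     # remove long tail words, e.g. 'kickkkkkkk' -> 'kick'
--     if len(word) < 4:
--         return word
--     count, position = 1, 2
--     tail_letter = list(word)[-1]
--     while list(word)[-position] == tail_letter:
--         count, position = count + 1, position + 1
--         if position == len(word):
--             # 'zzzzzzzzz' -> 'zzz'
--             return word[:3]
--     if count > 2:
--         return word[:-count+1]
--     else:
--         return word
-- ===== SOURCE B (Python) =====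
-- def remove_long_tail(word):
--     # binary search on the monotone predicate "word[i:] is a constant run of the
--     # last character" for the start of the trailing run, then trim by the rules.
--     n = len(word)
--     if n < 4:
--         return word
--     c = word[-1]
--     lo, hi = 0, n - 1  # word[n-1:] is trivially a run of c
--     while lo < hi:
--         mid = (lo + hi) // 2
--         if word[mid:] == c * (n - mid):
--             hi = mid
--         else:
--             lo = mid + 1
--     r = n - lo  # trailing run length
--     if r >= n - 1:
--         return word[:3]
--     if r > 2:
--         return word[:n - r + 1]
--     return word
-- ===== Notes on version B (the rewrite author's own statement) =====
-- stated objective: faster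
-- what changed: Replaces A's right-to-left character-by-character scan, which rebuilds list(word) on every iteration, by a binary search for the start of the trailing run — the predicate that the suffix from a position is a constant run of the last character is monotone in the position — followed by the same three trimming rules.
import Mathlib
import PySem

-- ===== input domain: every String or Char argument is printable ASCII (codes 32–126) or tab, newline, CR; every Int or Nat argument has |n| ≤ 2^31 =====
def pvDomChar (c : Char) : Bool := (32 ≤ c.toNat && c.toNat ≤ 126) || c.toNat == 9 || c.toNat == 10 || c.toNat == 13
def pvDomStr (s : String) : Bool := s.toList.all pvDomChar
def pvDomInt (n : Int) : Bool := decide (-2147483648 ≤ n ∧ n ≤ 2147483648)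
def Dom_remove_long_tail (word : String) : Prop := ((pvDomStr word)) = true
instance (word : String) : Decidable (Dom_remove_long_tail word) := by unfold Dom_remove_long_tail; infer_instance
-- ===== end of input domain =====

-- B replaces A's right-to-left character scan by a binary search for the start of the
-- trailing run, exploiting that "the suffix from i is a constant run" is monotone in i.

-- ===== PORT A =====
-- the while loop: state (count, position); fuel bounds the iterations (the loop returns before position reaches len)
def remove_long_tail_loop (word : String) (cs : List Char) (tl : Char) :
    Nat → Nat → Nat → String
  | count, position, fuel + 1 =>
    if PySem.List.pyGet? cs (-(position : Int)) = some tl then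
      if position + 1 = cs.length then
        String.ofList (PySem.List.slice cs none (some 3))
      else
        remove_long_tail_loop word cs tl (count + 1) (position + 1) fuel
    else
      if 2 < count then
        String.ofList (PySem.List.slice cs none (some (-(count : Int) + 1)))
      else
        word
  | _, _, 0 => word

def remove_long_tail (word : String) : String :=
  let cs := word.toList
  if cs.length < 4 then word
  else
    match PySem.List.pyGet? cs (-1) with
    | some tl => remove_long_tail_loop word cs tl 1 2 cs.length
    | none => word  -- unreachable: len ≥ 4

-- ===== PORT B =====
-- the binary-search loop: word[mid:] == c * (n - mid) ported as the literal list equation;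
-- fuel bounds the iterations (hi - lo shrinks each step, n is enough)
def rlt_bsearch (cs : List Char) (c : Char) : Nat → Nat → Nat → Nat
  | lo, hi, fuel + 1 =>
    if lo < hi then
      let mid := (lo + hi) / 2
      if cs.drop mid = List.replicate (cs.length - mid) c then
        rlt_bsearch cs c lo mid fuel
      else
        rlt_bsearch cs c (mid + 1) hi fuel
    else lo
  | lo, _, 0 => lo

def remove_long_tail_alt (word : String) : String :=
  let cs := word.toList
  let n := cs.length
  if n < 4 then word
  else
    match PySem.List.pyGet? cs (-1) with
    | none => word  -- unreachable: len ≥ 4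
    | some c =>
      let lo := rlt_bsearch cs c 0 (n - 1) n
      let r : Int := (n : Int) - (lo : Int)
      if (n : Int) - 1 ≤ r then String.ofList (PySem.List.slice cs none (some 3))
      else if 2 < r then String.ofList (PySem.List.slice cs none (some ((n : Int) - r + 1)))
      else word

-- ===== PRECONDITION & SPEC =====
def Spec_remove_long_tail (word : String) (out : String) : Prop := out = remove_long_tail_alt word
instance (word : String) (out : String) : Decidable (Spec_remove_long_tail word out) := by unfold Spec_remove_long_tail; infer_instance

-- ===== CLAIM (what is proved, stated in full; the proofs are below) =====
def Claim_equal_remove_long_tail : Prop := ∀ (word : String), Dom_remove_long_tail word → Spec_remove_long_tail word (remove_long_tail word)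

-- ===== LEMMAS AND PROOFS =====

-- inside the takeWhile run, every element satisfies p
theorem run_true {α : Type} (p : α → Bool) : ∀ (xs : List α) (k : Nat),
    k < (xs.takeWhile p).length → ∃ x, xs[k]? = some x ∧ p x = true := by
  intro xs
  induction xs with
  | nil => intro k hk; simp at hk
  | cons a t ih =>
    intro k hk
    by_cases hp : p a
    · cases k with
      | zero => exact ⟨a, by simp, hp⟩
      | succ n =>
        simp [hp] at hk
        obtain ⟨x, hx, hpx⟩ := ih n (by omega)
        exact ⟨x, by simpa using hx, hpx⟩
    · simp only [List.takeWhile_cons, hp] at hk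
      simp at hk

-- the element just past the run fails p
theorem run_false {α : Type} (p : α → Bool) : ∀ (xs : List α),
    (xs.takeWhile p).length < xs.length →
    ∃ x, xs[(xs.takeWhile p).length]? = some x ∧ p x = false := by
  intro xs
  induction xs with
  | nil => intro h; simp at h
  | cons a t ih =>
    intro h
    by_cases hp : p a
    · simp only [List.takeWhile_cons, hp, if_true, List.length_cons] at h ⊢
      obtain ⟨x, hx, hpx⟩ := ih (by omega)
      exact ⟨x, by simpa using hx, hpx⟩
    · refine ⟨a, ?_, by simpa using hp⟩
      simp [hp]

-- A's loop, entered with count = k, position = k + 1 and the last k characters all equal c,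
-- computes the three-way branch on the trailing-run length r
theorem loop_eq (word : String) (cs : List Char) (c : Char) (rest : List Char)
    (hrev : cs.reverse = c :: rest) :
    ∀ (fuel k : Nat), 1 ≤ k →
      k ≤ ((c :: rest).takeWhile (fun x => x == c)).length →
      k + 1 < cs.length → cs.length - k ≤ fuel →
      remove_long_tail_loop word cs c k (k + 1) fuel =
        (if cs.length - 1 ≤ ((c :: rest).takeWhile (fun x => x == c)).length then
          String.ofList (PySem.List.slice cs none (some 3))
        else if 2 < ((c :: rest).takeWhile (fun x => x == c)).length then
          String.ofList (PySem.List.slice cs none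
            (some (-((((c :: rest).takeWhile (fun x => x == c)).length : Int)) + 1)))
        else word) := by
  intro fuel
  induction fuel with
  | zero => intro k _ _ h3 h4; omega
  | succ fuel ih =>
    intro k hk1 hkr hklen hfuel
    set r := ((c :: rest).takeWhile (fun x => x == c)).length with hr
    have hrlen : r ≤ cs.length := by
      have h := (List.takeWhile_prefix (l := c :: rest) (fun x => x == c)).length_le
      have h2 : (c :: rest).length = cs.length := by rw [← hrev]; simp
      simp only [hr]
      omega
    have hguard : PySem.List.pyGet? cs (-((k : Int) + 1)) = cs.reverse[k]? := by
      have h1 : PySem.List.pyGet? cs (-(((k + 1 : Nat)) : Int)) = cs[cs.length - (k + 1)]? :=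
        PySem.List.pyGet?_neg_natCast cs (k + 1) (by omega) (by omega)
      have h2 : cs.reverse[k]? = cs[cs.length - 1 - k]? := List.getElem?_reverse (by omega)
      rw [h2]
      have : cs.length - (k + 1) = cs.length - 1 - k := by omega
      rw [← this, ← h1]
      norm_num
    by_cases hlt : k < r
    · -- guard true: cs.reverse[k] = c
      obtain ⟨x, hx, hpx⟩ := run_true (fun x => x == c) (c :: rest) k hlt
      have hxc : x = c := by simpa using hpx
      have hguard' : PySem.List.pyGet? cs (-((k : Int) + 1)) = some c := by
        rw [hguard, hrev, hx, hxc]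
      show remove_long_tail_loop word cs c k (k + 1) (fuel + 1) = _
      rw [remove_long_tail_loop]
      have hcast : -((k + 1 : Nat) : Int) = -((k : Int) + 1) := by push_cast; ring
      rw [hcast, if_pos hguard']
      by_cases hend : k + 1 + 1 = cs.length
      · rw [if_pos hend]
        have : cs.length - 1 ≤ r := by omega
        rw [if_pos this]
      · rw [if_neg hend]
        exact ih (k + 1) (by omega) (by omega) (by omega) (by omega)
    · -- guard false: k = r and cs.reverse[r] ≠ c
      have hkeq : k = r := by omega
      obtain ⟨x, hx, hpx⟩ := run_false (fun x => x == c) (c :: rest)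
        (by rw [← hr, ← hkeq]; have : (c :: rest).length = cs.length := by
              rw [← hrev]; simp
            omega)
      have hxc : x ≠ c := by simpa using hpx
      have hguard' : PySem.List.pyGet? cs (-((k : Int) + 1)) = some x := by
        rw [hguard, hrev, hkeq, hr]; exact hx
      show remove_long_tail_loop word cs c k (k + 1) (fuel + 1) = _
      rw [remove_long_tail_loop]
      have hcast : -((k + 1 : Nat) : Int) = -((k : Int) + 1) := by push_cast; ring
      rw [hcast, if_neg (by rw [hguard']; simp [hxc])]
      have hnot : ¬ (cs.length - 1 ≤ r) := by omega
      rw [if_neg hnot, hkeq]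

-- a prefix of a list is constantly c iff it lies inside the (· == c) run
theorem take_eq_replicate_iff (c : Char) : ∀ (l : List Char) (k : Nat), k ≤ l.length →
    (l.take k = List.replicate k c ↔ k ≤ (l.takeWhile (fun x => x == c)).length) := by
  intro l
  induction l with
  | nil =>
    intro k hk
    have hk0 : k = 0 := by simpa using hk
    subst hk0; simp
  | cons a t ih =>
    intro k hk
    cases k with
    | zero => simp
    | succ m =>
      by_cases ha : a = c
      · subst ha
        simp only [List.take_succ_cons, List.replicate_succ, List.cons.injEq, true_and,
          List.takeWhile_cons, BEq.rfl, if_true, List.length_cons, Nat.add_le_add_iff_right]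
        exact ih m (by simpa using hk)
      · constructor
        · intro h
          exact absurd (by simpa [List.replicate_succ] using congrArg (·[0]?) h) (by simp [ha])
        · intro h
          simp [ha] at h

-- characterization of the binary-search predicate: the suffix from i is a run of c
-- iff i is at or past the start of the trailing run
theorem pred_iff (cs : List Char) (c : Char) (rest : List Char)
    (hrev : cs.reverse = c :: rest) (i : Nat) (hi : i ≤ cs.length) :
    (cs.drop i = List.replicate (cs.length - i) c ↔
      cs.length - ((c :: rest).takeWhile (fun x => x == c)).length ≤ i) := by
  have hlen : (c :: rest).length = cs.length := by rw [← hrev]; simp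
  have hrle : ((c :: rest).takeWhile (fun x => x == c)).length ≤ cs.length := by
    have := (List.takeWhile_prefix (l := c :: rest) (fun x => x == c)).length_le
    omega
  rw [← List.reverse_inj, List.reverse_drop, hrev, List.reverse_replicate]
  rw [take_eq_replicate_iff c (c :: rest) (cs.length - i) (by omega)]
  omega

-- the binary search converges to the boundary b of any monotone predicate of this shape
theorem bsearch_eq (cs : List Char) (c : Char) (b : Nat)
    (hP : ∀ i, i ≤ cs.length →
      (cs.drop i = List.replicate (cs.length - i) c ↔ b ≤ i)) :
    ∀ (fuel lo hi : Nat), lo ≤ b → b ≤ hi → hi ≤ cs.length → hi - lo ≤ fuel →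
      rlt_bsearch cs c lo hi fuel = b := by
  intro fuel
  induction fuel with
  | zero =>
    intro lo hi h1 h2 h3 h4
    have : lo = b := by omega
    simpa [rlt_bsearch] using this
  | succ fuel ih =>
    intro lo hi h1 h2 h3 h4
    rw [rlt_bsearch]
    by_cases hlh : lo < hi
    · rw [if_pos hlh]
      have hmid : (lo + hi) / 2 ≤ cs.length := by omega
      by_cases hb : b ≤ (lo + hi) / 2
      · rw [if_pos ((hP _ hmid).mpr hb)]
        exact ih lo ((lo + hi) / 2) h1 hb (by omega) (by omega)
      · rw [if_neg (fun h => hb ((hP _ hmid).mp h))]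
        exact ih ((lo + hi) / 2 + 1) hi (by omega) h2 h3 (by omega)
    · rw [if_neg hlh]
      omega

-- ===== VERDICT (by name: the statement is the Claim_ definition above) =====
theorem remove_long_tail_spec : Claim_equal_remove_long_tail := by
  intro word _
  unfold Spec_remove_long_tail remove_long_tail remove_long_tail_alt
  by_cases hlen : word.toList.length < 4
  · rw [if_pos hlen, if_pos hlen]
  · rw [if_neg hlen, if_neg hlen]
    rcases hc : word.toList.reverse with _ | ⟨c, rest⟩
    · exfalso
      have h0 : word.toList.length = 0 := by
        have := congrArg List.length hc
        simpa using this
      omega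
    · have hlast : PySem.List.pyGet? word.toList (-1) = some c := by
        rw [PySem.List.pyGet?_neg_one, List.getLast?_eq_head?_reverse, hc]
        rfl
      rw [hlast]
      change remove_long_tail_loop word word.toList c 1 (1 + 1) word.toList.length =
        (if (word.toList.length : Int) - 1 ≤ (word.toList.length : Int) -
            ((rlt_bsearch word.toList c 0 (word.toList.length - 1) word.toList.length : Nat) : Int) then
          String.ofList (PySem.List.slice word.toList none (some 3))
        else if 2 < (word.toList.length : Int) -
            ((rlt_bsearch word.toList c 0 (word.toList.length - 1) word.toList.length : Nat) : Int) then
          String.ofList (PySem.List.slice word.toList none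
            (some ((word.toList.length : Int) - ((word.toList.length : Int) -
              ((rlt_bsearch word.toList c 0 (word.toList.length - 1) word.toList.length : Nat) : Int)) + 1)))
        else word)
      have hr1 : 1 ≤ ((c :: rest).takeWhile (fun x => x == c)).length := by simp
      have hrn : ((c :: rest).takeWhile (fun x => x == c)).length ≤ word.toList.length := by
        have h1 := (List.takeWhile_prefix (l := c :: rest) (fun x => x == c)).length_le
        have h2 := congrArg List.length hc
        simp only [List.length_reverse, List.length_cons] at h2
        simp only [List.length_cons] at h1
        omega
      have hbs : rlt_bsearch word.toList c 0 (word.toList.length - 1) word.toList.length =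
          word.toList.length - ((c :: rest).takeWhile (fun x => x == c)).length := by
        exact bsearch_eq word.toList c
          (word.toList.length - ((c :: rest).takeWhile (fun x => x == c)).length)
          (fun i hi => by rw [pred_iff word.toList c rest hc i hi])
          word.toList.length 0 (word.toList.length - 1) (by omega) (by omega) (by omega) (by omega)
      have key := loop_eq word word.toList c rest hc word.toList.length 1 le_rfl hr1
        (by omega) (by omega)
      rw [hbs, key]
      generalize hgr : ((c :: rest).takeWhile (fun x => x == c)).length = r at hr1 hrn ⊢
      generalize hgn : word.toList.length = n at hlen hrn ⊢
      by_cases h1 : n - 1 ≤ r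
      · rw [if_pos h1, if_pos (show (n : Int) - 1 ≤ (n : Int) - ((n - r : Nat) : Int) by omega)]
      · rw [if_neg h1, if_neg (show ¬((n : Int) - 1 ≤ (n : Int) - ((n - r : Nat) : Int)) by omega)]
        by_cases h2 : 2 < r
        · rw [if_pos h2, if_pos (show (2 : Int) < (n : Int) - ((n - r : Nat) : Int) by omega)]
          have e1 : -((r : Int)) + 1 = -(((r - 1 : Nat)) : Int) := by omega
          have e2 : (n : Int) - ((n : Int) - ((n - r : Nat) : Int)) + 1 =
              (((n - r + 1 : Nat)) : Int) := by omega
          rw [e1, e2, PySem.List.slice_to_neg_natCast word.toList (r - 1) (by omega),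
            PySem.List.slice_to_natCast]
          rw [hgn, show n - (r - 1) = n - r + 1 from by omega]
        · rw [if_neg h2, if_neg (show ¬((2 : Int) < (n : Int) - ((n - r : Nat) : Int)) by omega)]
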